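-- pv_equiv track=rewrite | github.com/isQ-Team/isQ-Compiler | simulator/plugins/python-routing-plugin/src/cir_gen/interface.py | convert_mappings
-- ===== SOURCE A (Python) =====
-- def convert_mappings(mapping1, mapping2):
--     '''
--     Generate SWAP gates to convert mapping1 (logical to physical) to
--     mapping2
--     '''
--     cir_list = []
--     mapping1 = mapping1.copy()
--     for q_log1 in range(len(mapping1)):
--         q_phy1 = mapping1[q_log1]
--         q_phy2 = mapping2[q_log1]
--         if q_phy1 == q_phy2: continue
--         cir_list.append((2, 'SWAP', (q_phy1, q_phy2), []))
--         for i in range(len(mapping1)):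
--             if mapping1[i] == q_phy2:
--                 mapping1[i] = q_phy1
--                 break
--         mapping1[q_log1] = q_phy2
--     return cir_list
-- ===== SOURCE B (Python) =====
-- def _sorted_insert(lst, x):
--     k = 0
--     while k < len(lst) and lst[k] < x:
--         k += 1
--     lst.insert(k, x)
--
--
-- def convert_mappings(mapping1, mapping2):
--     '''
--     Generate SWAP gates to convert mapping1 (logical to physical) to
--     mapping2, keeping a dict physical->sorted list of occurrence indices
--     so the first occurrence of q_phy2 is found without rescanning mapping1.
--     '''
--     cir_list = []
--     m = list(mapping1)
--     occ = {}
--     for i, v in enumerate(m):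
--         occ.setdefault(v, []).append(i)
--     for q in range(len(m)):
--         p1 = m[q]
--         p2 = mapping2[q]
--         if p1 == p2:
--             continue
--         cir_list.append((2, 'SWAP', (p1, p2), []))
--         lst2 = occ.get(p2)
--         if lst2:
--             i = lst2.pop(0)
--             m[i] = p1
--             _sorted_insert(occ[p1], i)
--         occ[p1].remove(q)
--         _sorted_insert(occ.setdefault(p2, []), q)
--         m[q] = p2
--     return cir_list
-- ===== Notes on version B (the rewrite author's own statement) =====
-- stated objective: faster
-- what changed: B precomputes a dict physical->sorted list of occurrence indices and updates it incrementally, so A's O(n) inner rescan of mapping1 for q_phy2 is replaced by dict lookups and small per-value list edits.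
import Mathlib
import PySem

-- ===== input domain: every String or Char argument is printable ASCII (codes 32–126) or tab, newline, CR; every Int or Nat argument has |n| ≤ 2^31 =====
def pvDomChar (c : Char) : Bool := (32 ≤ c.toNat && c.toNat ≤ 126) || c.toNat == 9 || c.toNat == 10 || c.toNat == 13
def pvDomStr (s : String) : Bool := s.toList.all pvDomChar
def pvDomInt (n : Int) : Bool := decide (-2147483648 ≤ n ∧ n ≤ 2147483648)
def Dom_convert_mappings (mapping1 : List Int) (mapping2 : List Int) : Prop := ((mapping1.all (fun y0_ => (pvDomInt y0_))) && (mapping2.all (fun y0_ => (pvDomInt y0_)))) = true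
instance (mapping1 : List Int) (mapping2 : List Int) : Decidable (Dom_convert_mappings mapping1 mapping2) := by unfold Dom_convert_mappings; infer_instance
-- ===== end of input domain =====

-- B replaces A's O(n) inner rescan for the position of q_phy2 by a dict
-- physical->sorted list of occurrence indices, updated incrementally.
-- (Python A mutates only its local copy of mapping1; no caller-visible mutation.)


-- ===== PORT A =====
-- inner loop: 'for i in range(len(mapping1)): if mapping1[i] == q_phy2: mapping1[i] = q_phy1; break'
def cmA_inner (m : List Int) (q_phy2 q_phy1 : Int) (idxs : List Int) : List Int :=
  match idxs with
  | [] => m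
  | i :: rest =>
    if PySem.List.pyGetD m i 0 = q_phy2 then PySem.List.pySetD m i q_phy1
    else cmA_inner m q_phy2 q_phy1 rest

-- body of the outer 'for q_log1 in range(len(mapping1))' loop, state = (mapping1, cir_list)
def cmA_step (mapping2 : List Int)
    (st : List Int × List (Int × String × (Int × Int) × List Int)) (q_log1 : Int) :
    List Int × List (Int × String × (Int × Int) × List Int) :=
  let m := st.1
  let q_phy1 := PySem.List.pyGetD m q_log1 0
  let q_phy2 := PySem.List.pyGetD mapping2 q_log1 0
  if q_phy1 = q_phy2 then st
  else
    let cir := st.2 ++ [(2, "SWAP", (q_phy1, q_phy2), ([] : List Int))]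
    let m := cmA_inner m q_phy2 q_phy1 (PySem.List.pyRange 0 (PySem.List.len m) 1)
    let m := PySem.List.pySetD m q_log1 q_phy2
    (m, cir)

def convert_mappings (mapping1 : List Int) (mapping2 : List Int) :
    List (Int × String × (Int × Int) × List Int) :=
  ((PySem.List.pyRange 0 (PySem.List.len mapping1) 1).foldl (cmA_step mapping2)
    (mapping1, [])).2

-- ===== PORT B =====
-- port of _sorted_insert: scan to the first position whose element is not < x, insert there
def pvSortedInsert (lst : List Int) (x : Int) : List Int :=
  match lst with
  | [] => [x]
  | y :: t => if y < x then y :: pvSortedInsert t x else x :: y :: t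

-- 'occ.setdefault(v, []).append(i)' for one enumerate pair (i, v)
def cmB_init (d : PySem.Dict Int (List Int)) (p : Int × Int) : PySem.Dict Int (List Int) :=
  d.insert p.2 (((d.get? p.2).getD []) ++ [p.1])

-- body of B's loop, state = (m, occ, cir_list); occ maps a physical qubit to the
-- ascending list of its indices in m.  Python's 'occ[p1].remove(q)' raises ValueError
-- only when q is absent, which never happens when the loop runs (occ is exact);
-- List.erase is its value wherever Python returns.
def cmB_step (mapping2 : List Int)
    (st : List Int × PySem.Dict Int (List Int) × List (Int × String × (Int × Int) × List Int))
    (q : Int) :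
    List Int × PySem.Dict Int (List Int) × List (Int × String × (Int × Int) × List Int) :=
  let m := st.1
  let occ := st.2.1
  let p1 := PySem.List.pyGetD m q 0
  let p2 := PySem.List.pyGetD mapping2 q 0
  if p1 = p2 then st
  else
    let cir := st.2.2 ++ [(2, "SWAP", (p1, p2), ([] : List Int))]
    let mo :=
      match (occ.get? p2).getD [] with
      | [] => (m, occ)
      | i :: rest =>
        let m1 := PySem.List.pySetD m i p1
        let occ1 := occ.insert p2 rest
        (m1, occ1.insert p1 (pvSortedInsert ((occ1.get? p1).getD []) i))
    let occ2 := mo.2.insert p1 (((mo.2.get? p1).getD []).erase q)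
    let occ3 := occ2.insert p2 (pvSortedInsert ((occ2.get? p2).getD []) q)
    (PySem.List.pySetD mo.1 q p2, occ3, cir)

def convert_mappings_alt (mapping1 : List Int) (mapping2 : List Int) :
    List (Int × String × (Int × Int) × List Int) :=
  let occ0 := (PySem.List.enumerate mapping1 0).foldl cmB_init PySem.Dict.empty
  ((PySem.List.pyRange 0 (PySem.List.len mapping1) 1).foldl (cmB_step mapping2)
    (mapping1, occ0, [])).2.2

-- ===== PRECONDITION & SPEC =====
-- Pre_ excludes only mapping2 shorter than mapping1, where A raises IndexError.
def Pre_convert_mappings (mapping1 : List Int) (mapping2 : List Int) : Prop :=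
  mapping1.length ≤ mapping2.length
instance (mapping1 : List Int) (mapping2 : List Int) : Decidable (Pre_convert_mappings mapping1 mapping2) := by unfold Pre_convert_mappings; infer_instance

def pvWitness_convert_mappings : List Int × List Int := ([1, 3, 3], [3, 1, 0])

def Spec_convert_mappings (mapping1 : List Int) (mapping2 : List Int) (out : List (Int × String × (Int × Int) × List Int)) : Prop := out = convert_mappings_alt mapping1 mapping2
instance (mapping1 : List Int) (mapping2 : List Int) (out : List (Int × String × (Int × Int) × List Int)) : Decidable (Spec_convert_mappings mapping1 mapping2 out) := by unfold Spec_convert_mappings; infer_instance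

-- ===== CLAIM (what is proved, stated in full; the proofs are below) =====
def Claim_equal_convert_mappings : Prop := ∀ (mapping1 : List Int) (mapping2 : List Int), Dom_convert_mappings mapping1 mapping2 → Pre_convert_mappings mapping1 mapping2 → Spec_convert_mappings mapping1 mapping2 (convert_mappings mapping1 mapping2)

-- ===== LEMMAS AND PROOFS =====

-- the ascending list of indices (offset by s) at which v occurs in m
def pvOcc (m : List Int) (s : Int) (v : Int) : List Int :=
  match m with
  | [] => []
  | x :: t => if x = v then s :: pvOcc t (s + 1) v else pvOcc t (s + 1) v
theorem pvOcc_lb (v : Int) : ∀ (m : List Int) (s e : Int), e ∈ pvOcc m s v → s ≤ e := by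
  intro m
  induction m with
  | nil => intro s e h; simp [pvOcc] at h
  | cons x t ih =>
    intro s e h
    unfold pvOcc at h
    by_cases hx : x = v
    · rw [if_pos hx] at h
      rcases List.mem_cons.mp h with h | h
      · omega
      · have := ih (s + 1) e h; omega
    · rw [if_neg hx] at h
      have := ih (s + 1) e h; omega
theorem pvSortedInsert_of_lt (l : List Int) (x : Int) (h : ∀ e ∈ l, x < e) :
    pvSortedInsert l x = x :: l := by
  cases l with
  | nil => rfl
  | cons y t =>
    have : ¬ y < x := by have := h y List.mem_cons_self; omega
    simp [pvSortedInsert, this]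
theorem pvSortedInsert_cons_of_lt (y : Int) (l : List Int) (x : Int) (h : y < x) :
    pvSortedInsert (y :: l) x = y :: pvSortedInsert l x := by
  simp [pvSortedInsert, h]
theorem pvOcc_set (w v : Int) :
    ∀ (m : List Int) (s : Int) (j : Nat) (hj : j < m.length), m[j] ≠ w →
    pvOcc (m.set j w) s v =
      if v = w then pvSortedInsert (pvOcc m s v) (s + (j : Int))
      else if v = m[j] then (pvOcc m s v).erase (s + (j : Int))
      else pvOcc m s v := by
  intro m
  induction m with
  | nil => intro s j hj; simp at hj
  | cons x t ih =>
    intro s j hj hw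
    cases j with
    | zero =>
      simp only [List.getElem_cons_zero] at hw ⊢
      simp only [List.set_cons_zero, Nat.cast_zero, add_zero]
      by_cases hv : v = w
      · subst hv
        have hx : ¬ x = v := fun hc => hw hc
        rw [if_pos rfl]
        unfold pvOcc
        rw [if_pos rfl, if_neg hx]
        rw [pvSortedInsert_of_lt _ _ (fun e he => by have := pvOcc_lb v t (s+1) e he; omega)]
      · rw [if_neg hv]
        by_cases hv2 : v = x
        · rw [if_pos hv2]
          unfold pvOcc
          rw [if_neg (fun hc : w = v => hv hc.symm), if_pos hv2.symm]
          rw [List.erase_cons_head]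
        · rw [if_neg hv2]
          unfold pvOcc
          rw [if_neg (fun hc : w = v => hv hc.symm), if_neg (fun hc : x = v => hv2 hc.symm)]
    | succ j' =>
      simp only [List.set_cons_succ, List.getElem_cons_succ] at hw ⊢
      have hj' : j' < t.length := by simpa using hj
      have hcast : (s + ((j' + 1 : Nat) : Int)) = (s + 1) + (j' : Int) := by push_cast; ring
      rw [hcast]
      unfold pvOcc
      rw [ih (s + 1) j' hj' hw]
      by_cases hv : v = w
      · rw [if_pos hv, if_pos hv]
        by_cases hxv : x = v
        · rw [if_pos hxv, if_pos hxv]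
          rw [pvSortedInsert_cons_of_lt _ _ _ (by omega)]
        · rw [if_neg hxv, if_neg hxv]
      · rw [if_neg hv, if_neg hv]
        by_cases hvt : v = t[j']
        · rw [if_pos hvt, if_pos hvt]
          by_cases hxv : x = v
          · rw [if_pos hxv, if_pos hxv]
            rw [List.erase_cons_tail (by simp; omega)]
          · rw [if_neg hxv, if_neg hxv]
        · rw [if_neg hvt, if_neg hvt]
theorem pvOcc_eq_nil_iff (m : List Int) (v : Int) : ∀ (s : Int), (pvOcc m s v = [] ↔ v ∉ m) := by
  induction m with
  | nil => intro s; simp [pvOcc]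
  | cons x t ih =>
    intro s
    unfold pvOcc
    by_cases hx : x = v
    · simp [hx]
    · simp only [if_neg hx, ih (s + 1), List.mem_cons]
      constructor
      · intro hnt hor
        rcases hor with hc | hc
        · exact hx hc.symm
        · exact hnt hc
      · intro hor hc
        exact hor (Or.inr hc)
theorem pvOcc_head (v : Int) :
    ∀ (m : List Int) (s i : Int) (rest : List Int), pvOcc m s v = i :: rest →
    ∃ jn : Nat, i = s + (jn : Int) ∧ ∃ hj : jn < m.length, m[jn] = v ∧
      PySem.List.index? m v = some jn := by
  intro m
  induction m with
  | nil => intro s i rest h; simp [pvOcc] at h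
  | cons x t ih =>
    intro s i rest h
    unfold pvOcc at h
    by_cases hx : x = v
    · rw [if_pos hx] at h
      have his : i = s := by injection h.symm
      subst hx
      exact ⟨0, by omega, by simp, by simp, by rw [PySem.List.index?_cons_self]⟩
    · rw [if_neg hx] at h
      obtain ⟨jn, hi, hj, hv, hix⟩ := ih (s + 1) i rest h
      refine ⟨jn + 1, by push_cast; omega, by simpa using hj, by simpa using hv, ?_⟩
      rw [PySem.List.index?_cons_of_ne _ hx, hix]
      rfl

theorem pv_occ0_aux :
    ∀ (t : List Int) (s : Int) (d : PySem.Dict Int (List Int)) (f : Int → List Int),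
    (∀ v, ((d.get? v).getD []) = f v) →
    ∀ v, ((((PySem.List.enumerate t s).foldl cmB_init d).get? v).getD [])
      = f v ++ pvOcc t s v := by
  intro t
  induction t with
  | nil => intro s d f h v; simpa [pvOcc] using h v
  | cons x rest ih =>
    intro s d f h v
    rw [PySem.List.enumerate_cons]
    simp only [List.foldl_cons]
    have hstep : ∀ v', (((cmB_init d (s, x)).get? v').getD [])
        = (fun v' => if v' = x then f v' ++ [s] else f v') v' := by
      intro v'
      simp only [cmB_init, PySem.Dict.get?_insert]
      by_cases hv : v' = x
      · simp [hv, h x]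
      · simp [hv, h v']
    rw [ih (s + 1) _ _ hstep v]
    by_cases hv : v = x
    · subst hv
      simp [pvOcc]
    · have hxv : ¬ x = v := fun hc => hv hc.symm
      simp [pvOcc, hv, hxv]

-- the invariant tying B's dict to the current list
def pvDInv (m : List Int) (occ : PySem.Dict Int (List Int)) : Prop :=
  ∀ v : Int, ((occ.get? v).getD []) = pvOcc m 0 v

theorem pv_occ0 (m : List Int) :
    pvDInv m ((PySem.List.enumerate m 0).foldl cmB_init PySem.Dict.empty) := by
  intro v
  simpa using pv_occ0_aux m 0 PySem.Dict.empty (fun _ => []) (by simp) v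

-- A's inner scan computes the set at the first index of q_phy2 (if any)
theorem pv_cmA_inner_aux (m : List Int) (p2 p1 : Int) :
    ∀ (fuel b : Nat), m.length - b = fuel → b ≤ m.length →
    cmA_inner m p2 p1 (PySem.List.pyRange (b : Int) (m.length : Int) 1) =
      match PySem.List.index? (m.drop b) p2 with
      | none => m
      | some j => m.set (b + j) p1 := by
  intro fuel
  induction fuel with
  | zero =>
    intro b hf hb
    have hb' : b = m.length := by omega
    rw [PySem.List.pyRange_one_eq_nil (by omega)]
    subst hb'
    simp [cmA_inner]
  | succ n ih =>
    intro b hf hb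
    have hblt : b < m.length := by omega
    rw [PySem.List.pyRange_one_cons (by exact_mod_cast hblt)]
    have hdrop : m.drop b = m[b] :: m.drop (b + 1) := (List.getElem_cons_drop hblt).symm
    simp only [cmA_inner, PySem.List.pyGetD_natCast, List.getD_eq_getElem m 0 hblt]
    by_cases hv : m[b] = p2
    · rw [if_pos hv, hdrop, hv, PySem.List.index?_cons_self]
      simp
    · rw [if_neg hv]
      have : ((b : Int) + 1) = ((b + 1 : Nat) : Int) := by push_cast; ring
      rw [this, ih (b + 1) (by omega) (by omega), hdrop, PySem.List.index?_cons_of_ne _ hv]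
      cases PySem.List.index? (m.drop (b + 1)) p2 with
      | none => simp
      | some j => simp [Nat.add_assoc, Nat.add_comm 1 j]

-- single step: states agree and the invariant is preserved
theorem pv_step_eq (mapping2 m : List Int) (occ : PySem.Dict Int (List Int))
    (cir : List (Int × String × (Int × Int) × List Int)) (a : Nat)
    (ha : a < m.length) (ha2 : a < mapping2.length) (hinv : pvDInv m occ) :
    (cmA_step mapping2 (m, cir) (a : Int)).1 = (cmB_step mapping2 (m, occ, cir) (a : Int)).1 ∧
    (cmA_step mapping2 (m, cir) (a : Int)).2 = (cmB_step mapping2 (m, occ, cir) (a : Int)).2.2 ∧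
    (cmB_step mapping2 (m, occ, cir) (a : Int)).1.length = m.length ∧
    pvDInv (cmB_step mapping2 (m, occ, cir) (a : Int)).1 (cmB_step mapping2 (m, occ, cir) (a : Int)).2.1 := by
  have hget1 : PySem.List.pyGetD m (a : Int) 0 = m[a] := by
    simp [List.getElem?_eq_getElem ha]
  have hget2 : PySem.List.pyGetD mapping2 (a : Int) 0 = mapping2[a] := by
    simp [List.getElem?_eq_getElem ha2]
  by_cases heq : m[a] = mapping2[a]
  · unfold cmA_step cmB_step
    simp only [hget1, hget2, if_pos heq]
    exact ⟨trivial, trivial, trivial, hinv⟩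
  · have hAin : cmA_inner m mapping2[a] m[a] (PySem.List.pyRange 0 (m.length : Int) 1) =
        match PySem.List.index? m mapping2[a] with
        | none => m
        | some j => m.set j m[a] := by
      have h0 := pv_cmA_inner_aux m mapping2[a] m[a] m.length 0 (by omega) (by omega)
      simpa using h0
    have hoccp2 := hinv mapping2[a]
    cases hocc : pvOcc m 0 mapping2[a] with
    | nil =>
      have hidx : PySem.List.index? m mapping2[a] = none :=
        (PySem.List.index?_eq_none_iff m mapping2[a]).mpr
          ((pvOcc_eq_nil_iff m mapping2[a] 0).mp hocc)
      have hidx' : List.idxOf? mapping2[a] m = (none : Option Nat) := by simpa using hidx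
      have hg2 : (occ.get? mapping2[a]).getD [] = [] := by rw [hoccp2, hocc]
      have hstA : cmA_step mapping2 (m, cir) (a : Int) =
          (m.set a mapping2[a],
           cir ++ [(2, "SWAP", (m[a], mapping2[a]), ([] : List Int))]) := by
        unfold cmA_step
        simp [hget1, hget2, heq, hAin, hidx']
      have hstB : cmB_step mapping2 (m, occ, cir) (a : Int) =
          (m.set a mapping2[a],
           (occ.insert m[a] (((occ.get? m[a]).getD []).erase (a : Int))).insert mapping2[a]
             (pvSortedInsert
               (((occ.insert m[a] (((occ.get? m[a]).getD []).erase (a : Int))).get?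
                  mapping2[a]).getD []) (a : Int)),
           cir ++ [(2, "SWAP", (m[a], mapping2[a]), ([] : List Int))]) := by
        unfold cmB_step
        simp only [hget1, hget2, if_neg heq, hg2]
        simp
      rw [hstA, hstB]
      refine ⟨rfl, rfl, by simp, ?_⟩
      intro v
      have hset := pvOcc_set mapping2[a] v m 0 a ha heq
      simp only [zero_add] at hset
      rw [hset]
      simp only [PySem.Dict.get?_insert]
      by_cases hv2 : v = mapping2[a]
      · rw [if_pos hv2, if_pos hv2]
        have hne : ¬ mapping2[a] = m[a] := fun hc => heq hc.symm
        simp only [Option.getD_some, hv2, if_neg hne]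
        rw [hoccp2]
      · rw [if_neg hv2, if_neg hv2]
        by_cases hv1 : v = m[a]
        · rw [if_pos hv1, if_pos hv1]
          simp only [Option.getD_some]
          rw [hinv m[a], hv1]
        · rw [if_neg hv1, if_neg hv1]
          exact hinv v
    | cons i rest =>
      obtain ⟨jn, hi0, hj, hmj, hidx⟩ := pvOcc_head mapping2[a] m 0 i rest hocc
      have hi : i = (jn : Int) := by omega
      have hidx' : List.idxOf? mapping2[a] m = some jn := by simpa using hidx
      have hja : jn ≠ a := by
        intro hc; subst hc; exact heq (hmj ▸ rfl)
      have hg2 : (occ.get? mapping2[a]).getD [] = i :: rest := by rw [hoccp2, hocc]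
      have hp2p1 : ¬ mapping2[a] = m[a] := fun hc => heq hc.symm
      -- closed forms of B's intermediate dicts
      have hocc1p1 : ((occ.insert mapping2[a] rest).get? m[a]).getD [] = pvOcc m 0 m[a] := by
        simp only [PySem.Dict.get?_insert, if_neg (fun hc : m[a] = mapping2[a] => heq hc)]
        exact hinv m[a]
      have hstA : cmA_step mapping2 (m, cir) (a : Int) =
          ((m.set jn m[a]).set a mapping2[a],
           cir ++ [(2, "SWAP", (m[a], mapping2[a]), ([] : List Int))]) := by
        unfold cmA_step
        simp [hget1, hget2, heq, hAin, hidx']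
      -- B's step, with every dict lookup resolved
      have hstB : cmB_step mapping2 (m, occ, cir) (a : Int) =
          ((m.set jn m[a]).set a mapping2[a],
           ((((occ.insert mapping2[a] rest).insert m[a]
                (pvSortedInsert (pvOcc m 0 m[a]) (jn : Int))).insert m[a]
                ((pvSortedInsert (pvOcc m 0 m[a]) (jn : Int)).erase (a : Int))).insert mapping2[a]
                (pvSortedInsert rest (a : Int))),
           cir ++ [(2, "SWAP", (m[a], mapping2[a]), ([] : List Int))]) := by
        unfold cmB_step
        simp only [hget1, hget2, if_neg heq, hg2]
        rw [hi]
        simp only [PySem.List.pySetD_natCast, hocc1p1]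
        simp only [PySem.Dict.get?_insert, if_neg hp2p1]
        simp
      rw [hstA, hstB]
      refine ⟨rfl, rfl, by simp, ?_⟩
      intro v
      -- target occurrence lists after the two sets
      have hm1a : (m.set jn m[a])[a]'(by simpa using ha) = m[a] := by
        rw [List.getElem_set]
        exact if_neg (by omega)
      have h1set := pvOcc_set m[a] v m 0 jn hj (hmj ▸ heq ∘ Eq.symm)
      have h2set := pvOcc_set mapping2[a] v (m.set jn m[a]) 0 a (by simpa using ha)
        (by rw [hm1a]; exact heq)
      simp only [zero_add, hmj, hm1a] at h1set h2set
      rw [h2set, h1set]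
      simp only [PySem.Dict.get?_insert]
      by_cases hv2 : v = mapping2[a]
      · subst hv2
        simp [hp2p1, hocc, hi]
      · by_cases hv1 : v = m[a]
        · subst hv1
          simp [heq]
        · simp [hv1, hv2, hinv v]

-- the two loops produce the same circuit
theorem pv_loop_eq (mapping2 : List Int) (L : Nat) (hL : L ≤ mapping2.length) :
    ∀ (n a : Nat), a + n = L →
    ∀ (m : List Int) (occ : PySem.Dict Int (List Int))
      (cir : List (Int × String × (Int × Int) × List Int)),
      m.length = L → pvDInv m occ →
      ((PySem.List.pyRange (a : Int) (L : Int) 1).foldl (cmA_step mapping2) (m, cir)).2 =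
      ((PySem.List.pyRange (a : Int) (L : Int) 1).foldl (cmB_step mapping2) (m, occ, cir)).2.2 := by
  intro n
  induction n with
  | zero =>
    intro a hfuel m occ cir hlen hinv
    rw [PySem.List.pyRange_one_eq_nil (by omega)]
    simp
  | succ k ih =>
    intro a hfuel m occ cir hlen hinv
    have halt : a < L := by omega
    rw [PySem.List.pyRange_one_cons (by exact_mod_cast halt)]
    simp only [List.foldl_cons]
    obtain ⟨h1, h2, h3, h4⟩ :=
      pv_step_eq mapping2 m occ cir a (by omega) (by omega) hinv
    have hA : cmA_step mapping2 (m, cir) (a : Int) =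
        ((cmB_step mapping2 (m, occ, cir) (a : Int)).1,
         (cmB_step mapping2 (m, occ, cir) (a : Int)).2.2) := Prod.ext h1 h2
    rw [hA]
    have hcast : ((a : Int) + 1) = ((a + 1 : Nat) : Int) := by push_cast; ring
    rw [hcast]
    exact ih (a + 1) (by omega) _ _ _ (h3.trans hlen) h4

-- ===== VERDICT (by name: the statement is the Claim_ definition above) =====
theorem convert_mappings_spec : Claim_equal_convert_mappings := by
  intro m1 m2 _ hpre
  unfold Spec_convert_mappings convert_mappings convert_mappings_alt
  simp only [PySem.List.len_eq]
  exact pv_loop_eq m2 m1.length hpre m1.length 0 (by omega) m1 _ [] rfl (pv_occ0 m1)
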